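-- pv_equiv track=rewrite | github.com/edicristofaro/advent-of-code-2024 | day8/day8.py | part1
-- ===== SOURCE A (Python) =====
-- def part1(grid, grid_size):
--     # for every point in the dict
--     # find other the points of the same value in the dict
--     # calculate the rise and run between each pair, subtracting the pair point from the current point
--     # antinode 1: subtract that rise and run from the pair point
--     # antinode 2: add the rise and run from the current point
--     # I might be wrong on the above and you need to add to the pair point and subtract from the current point
--     antinodes = []
--
--     for p, letter in grid.items():
--         same = []
--         for k, v in grid.items():
--             if v == letter and k != p:
--                 same.append(k)
--         for s in same:
--             run = p[0] - s[0]
--             rise = p[1] - s[1]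
--             antinode_1 = (s[0] - run, s[1] - rise)
--             antinode_2 = (p[0] + run, p[1] + rise)
--             if bounds_check(grid_size, antinode_1):
--                 antinodes.append(antinode_1)
--             if bounds_check(grid_size, antinode_2):
--                 antinodes.append(antinode_2)
--
--     return len(set(antinodes))
--
-- def bounds_check(grid_size, point):
--     if point[0] in range(0, grid_size) and point[1] in range(0, grid_size):
--         return True
--     else:
--         return False
-- ===== SOURCE B (Python) =====
-- def part1(grid, grid_size):
--     # group points by letter, then one antinode formula (2p - s) per ordered
--     # in-group pair: each unordered pair yields both of A's antinodes this way
--     groups = {}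
--     for p, letter in grid.items():
--         groups[letter] = groups.get(letter, []) + [p]
--     antinodes = set()
--     for pts in groups.values():
--         for p in pts:
--             for s in pts:
--                 if s != p:
--                     a = (2 * p[0] - s[0], 2 * p[1] - s[1])
--                     if 0 <= a[0] < grid_size and 0 <= a[1] < grid_size:
--                         antinodes.add(a)
--     return len(antinodes)
-- ===== Notes on version B (the rewrite author's own statement) =====
-- stated objective: faster
-- what changed: B groups the points by letter in one pass and emits the single antinode 2p-s for every ordered in-group pair into a set, instead of A's rescan of the whole dict for every point and its two antinode formulas per pair.
import Mathlib
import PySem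

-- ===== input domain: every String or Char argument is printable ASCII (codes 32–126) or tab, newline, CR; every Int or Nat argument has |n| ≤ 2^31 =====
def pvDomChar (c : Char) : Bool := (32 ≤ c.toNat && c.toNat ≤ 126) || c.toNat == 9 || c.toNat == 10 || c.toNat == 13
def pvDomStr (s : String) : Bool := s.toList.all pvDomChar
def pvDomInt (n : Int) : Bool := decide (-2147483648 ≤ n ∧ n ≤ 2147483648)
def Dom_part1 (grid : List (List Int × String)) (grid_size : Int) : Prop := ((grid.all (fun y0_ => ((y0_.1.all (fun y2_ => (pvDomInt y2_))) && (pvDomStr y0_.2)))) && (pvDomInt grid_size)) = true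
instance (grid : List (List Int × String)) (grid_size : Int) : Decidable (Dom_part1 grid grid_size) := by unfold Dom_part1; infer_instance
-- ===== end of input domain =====

-- B groups the points by letter once and emits the single antinode 2p-s for every ordered
-- in-group pair, instead of A's scan of the whole dict for every point and two antinode
-- formulas; equivalence of the RETURN value is proved (A mutates nothing).

-- ===== PORT A =====
def boundsCheck (grid_size : Int) (point : Int × Int) : Bool :=
  if (0 ≤ point.1 ∧ point.1 < grid_size) ∧ (0 ≤ point.2 ∧ point.2 < grid_size) then true
  else false

def part1 (grid : List (List Int × String)) (grid_size : Int) : Int :=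
  let items := (PySem.Dict.ofList grid).items
  let antinodes :=
    items.foldl (fun antinodes pl =>
      let same := items.foldl (fun same kv =>
        if kv.2 == pl.2 && !(kv.1 == pl.1) then same ++ [kv.1] else same) []
      same.foldl (fun antinodes s =>
        let run := PySem.List.pyGetD pl.1 0 0 - PySem.List.pyGetD s 0 0
        let rise := PySem.List.pyGetD pl.1 1 0 - PySem.List.pyGetD s 1 0
        let antinode_1 := (PySem.List.pyGetD s 0 0 - run, PySem.List.pyGetD s 1 0 - rise)
        let antinode_2 := (PySem.List.pyGetD pl.1 0 0 + run, PySem.List.pyGetD pl.1 1 0 + rise)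
        let antinodes1 := if boundsCheck grid_size antinode_1 then antinodes ++ [antinode_1] else antinodes
        if boundsCheck grid_size antinode_2 then antinodes1 ++ [antinode_2] else antinodes1)
        antinodes) []
  PySem.Set.len (PySem.Set.ofList antinodes)

-- ===== PORT B =====
def part1_alt (grid : List (List Int × String)) (grid_size : Int) : Int :=
  let items := (PySem.Dict.ofList grid).items
  let groups : PySem.Dict String (List (List Int)) :=
    items.foldl (fun g pl => g.modify pl.2 [] (fun v => v ++ [pl.1])) PySem.Dict.empty
  let antinodes :=
    groups.values.foldl (fun acc pts =>
      pts.foldl (fun acc p =>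
        pts.foldl (fun acc s =>
          if !(s == p) then
            let a := (2 * PySem.List.pyGetD p 0 0 - PySem.List.pyGetD s 0 0,
                      2 * PySem.List.pyGetD p 1 0 - PySem.List.pyGetD s 1 0)
            if decide (0 ≤ a.1 ∧ a.1 < grid_size ∧ 0 ≤ a.2 ∧ a.2 < grid_size) then
              PySem.Set.add acc a
            else acc
          else acc) acc) acc) PySem.Set.empty
  PySem.Set.len antinodes

-- ===== PRECONDITION & SPEC =====
-- Pre_ excludes exactly the inputs on which A raises IndexError: a dict key of fewer than
-- two coordinates that shares its letter with another key (the pair loop indexes both keys).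
def Pre_part1 (grid : List (List Int × String)) (grid_size : Int) : Prop :=
  ∀ pl ∈ (PySem.Dict.ofList grid).items, ∀ kv ∈ (PySem.Dict.ofList grid).items,
    pl.2 = kv.2 → pl.1 ≠ kv.1 → 2 ≤ pl.1.length
instance (grid : List (List Int × String)) (grid_size : Int) : Decidable (Pre_part1 grid grid_size) := by unfold Pre_part1; infer_instance
def pvWitness_part1 : (List (List Int × String)) × Int := ([([0, 0], "a"), ([1, 2], "a")], 4)

def Spec_part1 (grid : List (List Int × String)) (grid_size : Int) (out : Int) : Prop := out = part1_alt grid grid_size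
instance (grid : List (List Int × String)) (grid_size : Int) (out : Int) : Decidable (Spec_part1 grid grid_size out) := by unfold Spec_part1; infer_instance

-- ===== CLAIM (what is proved, stated in full; the proofs are below) =====
def Claim_equal_part1 : Prop := ∀ (grid : List (List Int × String)) (grid_size : Int), Dom_part1 grid grid_size → Pre_part1 grid grid_size → Spec_part1 grid grid_size (part1 grid grid_size)

-- ===== LEMMAS AND PROOFS =====

-- the single antinode of the ordered pair (p, s)
def pvAnti (p s : List Int) : Int × Int :=
  (2 * PySem.List.pyGetD p 0 0 - PySem.List.pyGetD s 0 0,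
   2 * PySem.List.pyGetD p 1 0 - PySem.List.pyGetD s 1 0)

def pvInb (grid_size : Int) (a : Int × Int) : Prop :=
  0 ≤ a.1 ∧ a.1 < grid_size ∧ 0 ≤ a.2 ∧ a.2 < grid_size

-- what both programs collect: antinodes of same-letter ordered pairs of distinct keys
def pvQ (grid : List (List Int × String)) (grid_size : Int) (x : Int × Int) : Prop :=
  ∃ p l s, (p, l) ∈ (PySem.Dict.ofList grid).items ∧ (s, l) ∈ (PySem.Dict.ofList grid).items ∧
    s ≠ p ∧ pvInb grid_size (pvAnti p s) ∧ x = pvAnti p s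

lemma mem_foldl_step {α β : Type} (f : List α → β → List α) (P : β → α → Prop)
    (hf : ∀ acc x y, y ∈ f acc x ↔ y ∈ acc ∨ P x y) (l : List β) (acc : List α) (y : α) :
    y ∈ l.foldl f acc ↔ y ∈ acc ∨ ∃ x ∈ l, P x y := by
  induction l generalizing acc with
  | nil => simp
  | cons b t ih =>
    simp only [List.foldl_cons, ih, hf, List.mem_cons]
    constructor
    · rintro ((h|h)|⟨x,hx,hP⟩)
      · exact Or.inl h
      · exact Or.inr ⟨b, Or.inl rfl, h⟩
      · exact Or.inr ⟨x, Or.inr hx, hP⟩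
    · rintro (h|⟨x,(rfl|hx),hP⟩)
      · exact Or.inl (Or.inl h)
      · exact Or.inl (Or.inr hP)
      · exact Or.inr ⟨x, hx, hP⟩

lemma nodup_foldl_step {α β : Type} (f : List α → β → List α)
    (hf : ∀ acc x, acc.Nodup → (f acc x).Nodup) (l : List β) (acc : List α) (h : acc.Nodup) :
    (l.foldl f acc).Nodup := by
  induction l generalizing acc with
  | nil => simpa
  | cons b t ih => exact ih _ (hf _ _ h)

lemma boundsCheck_iff (grid_size : Int) (a : Int × Int) :
    boundsCheck grid_size a = true ↔ pvInb grid_size a := by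
  simp [boundsCheck, pvInb]; tauto

def pvItems (grid : List (List Int × String)) : List (List Int × String) :=
  (PySem.Dict.ofList grid).items

-- proof-side copies of the two loop bodies (definitionally equal to the ports')
def pvSame (grid : List (List Int × String)) (pl : List Int × String) : List (List Int) :=
  (pvItems grid).foldl (fun same kv =>
    if kv.2 == pl.2 && !(kv.1 == pl.1) then same ++ [kv.1] else same) []

def pvStepA (grid_size : Int) (p : List Int) (antinodes : List (Int × Int)) (s : List Int) :
    List (Int × Int) :=
  let run := PySem.List.pyGetD p 0 0 - PySem.List.pyGetD s 0 0
  let rise := PySem.List.pyGetD p 1 0 - PySem.List.pyGetD s 1 0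
  let antinode_1 := (PySem.List.pyGetD s 0 0 - run, PySem.List.pyGetD s 1 0 - rise)
  let antinode_2 := (PySem.List.pyGetD p 0 0 + run, PySem.List.pyGetD p 1 0 + rise)
  let antinodes1 := if boundsCheck grid_size antinode_1 then antinodes ++ [antinode_1] else antinodes
  if boundsCheck grid_size antinode_2 then antinodes1 ++ [antinode_2] else antinodes1

def pvAL (grid : List (List Int × String)) (grid_size : Int) : List (Int × Int) :=
  (pvItems grid).foldl (fun antinodes pl => (pvSame grid pl).foldl (pvStepA grid_size pl.1) antinodes) []

def pvStepB (grid_size : Int) (p : List Int) (acc : PySem.Set (Int × Int)) (s : List Int) :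
    PySem.Set (Int × Int) :=
  if !(s == p) then
    let a := (2 * PySem.List.pyGetD p 0 0 - PySem.List.pyGetD s 0 0,
              2 * PySem.List.pyGetD p 1 0 - PySem.List.pyGetD s 1 0)
    if decide (0 ≤ a.1 ∧ a.1 < grid_size ∧ 0 ≤ a.2 ∧ a.2 < grid_size) then
      PySem.Set.add acc a
    else acc
  else acc

def pvGroups (grid : List (List Int × String)) : PySem.Dict String (List (List Int)) :=
  (pvItems grid).foldl (fun g pl => g.modify pl.2 [] (fun v => v ++ [pl.1])) PySem.Dict.empty

def pvBS (grid : List (List Int × String)) (grid_size : Int) : PySem.Set (Int × Int) :=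
  (pvGroups grid).values.foldl (fun acc pts =>
    pts.foldl (fun acc p => pts.foldl (pvStepB grid_size p) acc) acc) PySem.Set.empty

lemma part1_eq (grid : List (List Int × String)) (grid_size : Int) :
    part1 grid grid_size = PySem.Set.len (PySem.Set.ofList (pvAL grid grid_size)) := rfl

lemma part1_alt_eq (grid : List (List Int × String)) (grid_size : Int) :
    part1_alt grid grid_size = PySem.Set.len (pvBS grid grid_size) := rfl

lemma stepA_mem (grid_size : Int) (p : List Int) (acc : List (Int × Int)) (s : List Int)
    (y : Int × Int) :
    y ∈ pvStepA grid_size p acc s ↔ y ∈ acc ∨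
      ((pvInb grid_size (pvAnti s p) ∧ y = pvAnti s p) ∨
       (pvInb grid_size (pvAnti p s) ∧ y = pvAnti p s)) := by
  have h1 : (PySem.List.pyGetD s 0 0 - (PySem.List.pyGetD p 0 0 - PySem.List.pyGetD s 0 0),
             PySem.List.pyGetD s 1 0 - (PySem.List.pyGetD p 1 0 - PySem.List.pyGetD s 1 0)) = pvAnti s p := by
    unfold pvAnti; congr 1 <;> ring
  have h2 : (PySem.List.pyGetD p 0 0 + (PySem.List.pyGetD p 0 0 - PySem.List.pyGetD s 0 0),
             PySem.List.pyGetD p 1 0 + (PySem.List.pyGetD p 1 0 - PySem.List.pyGetD s 1 0)) = pvAnti p s := by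
    unfold pvAnti; congr 1 <;> ring
  unfold pvStepA
  simp only [h1, h2]
  rw [show pvInb grid_size (pvAnti s p) = (boundsCheck grid_size (pvAnti s p) = true) from
        propext (boundsCheck_iff _ _).symm,
      show pvInb grid_size (pvAnti p s) = (boundsCheck grid_size (pvAnti p s) = true) from
        propext (boundsCheck_iff _ _).symm]
  split_ifs <;> simp_all

lemma sameA_mem (grid : List (List Int × String)) (pl : List Int × String) (s : List Int) :
    s ∈ pvSame grid pl ↔ ∃ kv ∈ pvItems grid, kv.2 = pl.2 ∧ kv.1 ≠ pl.1 ∧ s = kv.1 := by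
  unfold pvSame
  rw [PySem.List.foldl_append_if]
  simp only [List.nil_append, List.mem_map, List.mem_filter, Bool.and_eq_true, beq_iff_eq,
    Bool.not_eq_true', beq_eq_false_iff_ne]
  constructor
  · rintro ⟨kv, ⟨hkv, h2, h1⟩, rfl⟩; exact ⟨kv, hkv, h2, h1, rfl⟩
  · rintro ⟨kv, hkv, h2, h1, rfl⟩; exact ⟨kv, ⟨hkv, h2, h1⟩, rfl⟩

lemma memA (grid : List (List Int × String)) (grid_size : Int) (x : Int × Int) :
    x ∈ pvAL grid grid_size ↔ pvQ grid grid_size x := by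
  unfold pvAL
  rw [mem_foldl_step _ (fun pl y => ∃ s ∈ pvSame grid pl,
        (pvInb grid_size (pvAnti s pl.1) ∧ y = pvAnti s pl.1) ∨
        (pvInb grid_size (pvAnti pl.1 s) ∧ y = pvAnti pl.1 s))
      (fun acc pl y => mem_foldl_step _ _ (fun a s z => stepA_mem grid_size pl.1 a s z) _ acc y)]
  simp only [List.not_mem_nil, false_or]
  constructor
  · rintro ⟨pl, hpl, s, hs, hcase⟩
    obtain ⟨kv, hkv, hlet, hne, rfl⟩ := (sameA_mem grid pl s).mp hs
    rcases hcase with ⟨hin, rfl⟩ | ⟨hin, rfl⟩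
    · exact ⟨kv.1, pl.2, pl.1, by rwa [← hlet, Prod.mk.eta], by rwa [Prod.mk.eta], hne.symm ∘ Eq.symm ∘ id ∘ Eq.symm, hin, rfl⟩
    · exact ⟨pl.1, pl.2, kv.1, by rwa [Prod.mk.eta], by rwa [← hlet, Prod.mk.eta], hne, hin, rfl⟩
  · rintro ⟨p, l, s, hp, hs, hne, hin, rfl⟩
    refine ⟨(p, l), hp, s, ?_, Or.inr ⟨hin, rfl⟩⟩
    exact (sameA_mem grid (p, l) s).mpr ⟨(s, l), hs, rfl, hne, rfl⟩

lemma stepB_mem (grid_size : Int) (p : List Int) (acc : PySem.Set (Int × Int)) (s : List Int)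
    (y : Int × Int) :
    y ∈ pvStepB grid_size p acc s ↔ y ∈ acc ∨
      (s ≠ p ∧ pvInb grid_size (pvAnti p s) ∧ y = pvAnti p s) := by
  have ha : (2 * PySem.List.pyGetD p 0 0 - PySem.List.pyGetD s 0 0,
             2 * PySem.List.pyGetD p 1 0 - PySem.List.pyGetD s 1 0) = pvAnti p s := rfl
  unfold pvStepB
  simp only [ha]
  by_cases hne : s = p
  · simp [hne]
  · have hb : (!(s == p)) = true := by simp [hne]
    rw [hb, if_pos rfl]
    by_cases hin : pvInb grid_size (pvAnti p s)
    · rw [if_pos (by unfold pvInb at hin; exact decide_eq_true hin)]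
      simp [PySem.Set.mem_add, hne, hin]
    · rw [if_neg (by exact fun hd => absurd (of_decide_eq_true hd) hin)]
      constructor
      · exact fun h => Or.inl h
      · rintro (h | ⟨_, hi, _⟩)
        · exact h
        · exact absurd hi hin

lemma grp_mem (grid : List (List Int × String)) (c : String) (p : List Int) :
    p ∈ (pvGroups grid).getD c [] ↔ (p, c) ∈ pvItems grid := by
  unfold pvGroups
  rw [show (pvItems grid).foldl (fun g pl => g.modify pl.2 [] (fun v => v ++ [pl.1])) PySem.Dict.empty
        = ((pvItems grid).map (fun pl => (pl.2, pl.1))).foldl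
            (fun d q => d.modify q.1 [] (fun v => v ++ [q.2])) PySem.Dict.empty from by
        rw [List.foldl_map]]
  rw [PySem.Dict.getD_foldl_modify_append]
  simp only [PySem.Dict.getD_empty, List.nil_append, List.filter_map, List.map_map,
    List.mem_map, List.mem_filter, Function.comp_apply, beq_iff_eq]
  constructor
  · rintro ⟨pl, ⟨hpl, hc⟩, rfl⟩
    subst hc
    simpa using hpl
  · intro h; exact ⟨(p, c), ⟨h, rfl⟩, rfl⟩

lemma nodup_keys_groups (grid : List (List Int × String)) : (pvGroups grid).keys.Nodup := by
  unfold pvGroups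
  exact PySem.Dict.nodup_keys_foldl_modify_key (pvItems grid) (fun pl => pl.2) []
    (fun _ pl => fun v => v ++ [pl.1]) PySem.Dict.empty PySem.Dict.nodup_keys_empty

lemma values_groups (grid : List (List Int × String)) :
    (pvGroups grid).values = (pvGroups grid).keys.map (fun c => (pvGroups grid).getD c []) :=
  PySem.Dict.values_eq_map_keys _ (nodup_keys_groups grid) []

lemma keys_groups_mem (grid : List (List Int × String)) (c : String) :
    c ∈ (pvGroups grid).keys ↔ ∃ pl ∈ pvItems grid, pl.2 = c := by
  unfold pvGroups
  rw [PySem.Dict.keys_foldl_modify_key]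
  simp [PySem.Set.mem_update, PySem.Dict.keys_empty, List.mem_map]

lemma memB (grid : List (List Int × String)) (grid_size : Int) (x : Int × Int) :
    x ∈ pvBS grid grid_size ↔ pvQ grid grid_size x := by
  unfold pvBS
  rw [mem_foldl_step _ (fun pts y => ∃ p ∈ pts, ∃ s ∈ pts,
        s ≠ p ∧ pvInb grid_size (pvAnti p s) ∧ y = pvAnti p s)
      (fun acc pts y => mem_foldl_step _
        (fun p y => ∃ s ∈ pts, s ≠ p ∧ pvInb grid_size (pvAnti p s) ∧ y = pvAnti p s)
        (fun a p z => mem_foldl_step _ _ (fun a2 s z2 => stepB_mem grid_size p a2 s z2) pts a z)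
        pts acc y)]
  rw [values_groups]
  simp only [PySem.Set.empty, List.not_mem_nil, false_or, List.mem_map]
  constructor
  · rintro ⟨pts, ⟨c, hc, rfl⟩, p, hp, s, hs, hne, hin, rfl⟩
    exact ⟨p, c, s, (grp_mem grid c p).mp hp, (grp_mem grid c s).mp hs, hne, hin, rfl⟩
  · rintro ⟨p, l, s, hp, hs, hne, hin, rfl⟩
    have hl : l ∈ (pvGroups grid).keys := (keys_groups_mem grid l).mpr ⟨(p, l), hp, rfl⟩
    exact ⟨(pvGroups grid).getD l [], ⟨l, hl, rfl⟩, p, (grp_mem grid l p).mpr hp,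
      s, (grp_mem grid l s).mpr hs, hne, hin, rfl⟩

lemma nodupB (grid : List (List Int × String)) (grid_size : Int) : (pvBS grid grid_size).Nodup := by
  unfold pvBS
  refine nodup_foldl_step _ (fun acc pts hacc => ?_) _ _ List.nodup_nil
  refine nodup_foldl_step _ (fun acc2 p hacc2 => ?_) _ _ hacc
  refine nodup_foldl_step _ (fun acc3 s hacc3 => ?_) _ _ hacc2
  unfold pvStepB
  split_ifs with h
  · dsimp only
    split_ifs
    · apply PySem.Set.nodup_add
      exact hacc3
    · exact hacc3
  · exact hacc3

theorem part1_spec' : ∀ (grid : List (List Int × String)) (grid_size : Int),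
    part1 grid grid_size = part1_alt grid grid_size := by
  intro grid gs
  rw [part1_eq, part1_alt_eq]
  have nd1 : (PySem.Set.ofList (pvAL grid gs)).Nodup := PySem.Set.nodup_ofList _
  have nd2 : (pvBS grid gs).Nodup := nodupB grid gs
  have hperm : (PySem.Set.ofList (pvAL grid gs)).Perm (pvBS grid gs) :=
    (List.perm_ext_iff_of_nodup nd1 nd2).mpr
      (fun x => by rw [PySem.Set.mem_ofList, memA, memB])
  simp [PySem.Set.len, hperm.length_eq]

-- ===== VERDICT (by name: the statement is the Claim_ definition above) =====
theorem part1_spec : Claim_equal_part1 := by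
  intro grid gs _ _
  unfold Spec_part1
  exact part1_spec' grid gs
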